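-- pv_equiv track=rewrite | github.com/puyanguvic/tokenizer_icml2026 | src/ctok_core/induction/candidates.py | _iter_spans
-- ===== SOURCE A (Python) =====
-- def _iter_spans(line: str, boundary_chars: set[str] | None) -> list[str]:
--     if not boundary_chars:
--         return [line]
--     spans: list[str] = []
--     start = 0
--     for idx, ch in enumerate(line):
--         if ch not in boundary_chars:
--             continue
--         if start < idx:
--             spans.append(line[start:idx])
--         start = idx + 1
--     if start < len(line):
--         spans.append(line[start:])
--     return spans
-- ===== SOURCE B (Python) =====
-- def _iter_spans(line: str, boundary_chars: set[str] | None) -> list[str]: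
--     if not boundary_chars:
--         return [line]
--     spans: list[str] = []
--     buf: list[str] = []
--     for ch in line:
--         if ch in boundary_chars:
--             if buf:
--                 spans.append("".join(buf))
--                 buf = []
--         else:
--             buf.append(ch)
--     if buf:
--         spans.append("".join(buf))
--     return spans
-- ===== Notes on version B (the rewrite author's own statement) =====
-- stated objective: alternative
-- what changed: B accumulates the current span's characters in a buffer and flushes it at each boundary, instead of A's tracking of a start index and slicing the line between boundary positions.
import Mathlib
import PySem

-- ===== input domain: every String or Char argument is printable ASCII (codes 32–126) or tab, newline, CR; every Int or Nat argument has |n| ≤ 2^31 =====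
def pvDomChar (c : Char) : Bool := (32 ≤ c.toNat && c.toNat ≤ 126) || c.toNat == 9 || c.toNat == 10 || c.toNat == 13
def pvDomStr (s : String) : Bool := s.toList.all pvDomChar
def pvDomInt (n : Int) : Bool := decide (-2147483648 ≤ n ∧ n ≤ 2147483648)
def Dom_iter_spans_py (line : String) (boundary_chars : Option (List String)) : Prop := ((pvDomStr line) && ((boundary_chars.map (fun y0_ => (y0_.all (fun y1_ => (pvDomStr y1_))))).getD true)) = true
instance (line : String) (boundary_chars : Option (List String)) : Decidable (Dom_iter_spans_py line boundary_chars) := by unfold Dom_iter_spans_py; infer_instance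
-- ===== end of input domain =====

-- B replaces A's start-index tracking with slicing by a character buffer flushed at each boundary (alternative decomposition, same cost).

-- ===== PORT A =====
-- the 'for idx, ch in enumerate(line)' loop, carrying (spans, start);
-- line[start:idx] is PySem.List.slice on line's characters
def pvALoop (cs : List Char) (bc : List String) :
    List (Int × Char) → List String → Int → List String × Int
  | [], spans, start => (spans, start)
  | (idx, ch) :: rest, spans, start =>
    if ¬ bc.contains (String.ofList [ch]) then
      pvALoop cs bc rest spans start
    else
      pvALoop cs bc rest
        (if start < idx then
           spans ++ [String.ofList (PySem.List.slice cs (some start) (some idx))]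
         else spans)
        (idx + 1)

def iter_spans_py (line : String) (boundary_chars : Option (List String)) : List String :=
  match boundary_chars with
  | none => [line]
  | some bc =>
    if bc.isEmpty then [line]
    else
      let cs := line.toList
      let r := pvALoop cs bc (PySem.List.enumerate cs 0) [] 0
      if r.2 < (cs.length : Int) then
        r.1 ++ [String.ofList (PySem.List.slice cs (some r.2) none)]
      else r.1

-- ===== PORT B =====
-- the 'for ch in line' loop of Source B, carrying (spans, buf)
def pvBLoop (bc : List String) : List Char → List String → List Char → List String
  | [], spans, buf => if buf.isEmpty then spans else spans ++ [String.ofList buf]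
  | c :: rest, spans, buf =>
    if bc.contains (String.ofList [c]) then
      pvBLoop bc rest (if buf.isEmpty then spans else spans ++ [String.ofList buf]) []
    else
      pvBLoop bc rest spans (buf ++ [c])

def iter_spans_py_alt (line : String) (boundary_chars : Option (List String)) : List String :=
  match boundary_chars with
  | none => [line]
  | some bc =>
    if bc.isEmpty then [line]
    else pvBLoop bc line.toList [] []

-- ===== PRECONDITION & SPEC =====
def Spec_iter_spans_py (line : String) (boundary_chars : Option (List String)) (out : List String) : Prop := out = iter_spans_py_alt line boundary_chars
instance (line : String) (boundary_chars : Option (List String)) (out : List String) : Decidable (Spec_iter_spans_py line boundary_chars out) := by unfold Spec_iter_spans_py; infer_instance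

-- ===== CLAIM (what is proved, stated in full; the proofs are below) =====
def Claim_equal_iter_spans_py : Prop := ∀ (line : String) (boundary_chars : Option (List String)), Dom_iter_spans_py line boundary_chars → Spec_iter_spans_py line boundary_chars (iter_spans_py line boundary_chars)

-- ===== LEMMAS AND PROOFS =====

-- invariant: after processing the first i characters with current span started at s ≤ i,
-- A's (spans, start = s) corresponds to B's (spans, buf = cs[s:i])
lemma pv_loop_eq (cs : List Char) (bc : List String) :
    ∀ (rest : List Char) (i s : Nat) (spans : List String),
      s ≤ i → cs.drop i = rest →
      (let r := pvALoop cs bc (PySem.List.enumerate rest (i : Int)) spans (s : Int)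
       if r.2 < (cs.length : Int) then
         r.1 ++ [String.ofList (PySem.List.slice cs (some r.2) none)]
       else r.1)
      = pvBLoop bc rest spans ((cs.drop s).take (i - s)) := by
  intro rest
  induction rest with
  | nil =>
    intro i s spans hsi hdrop
    have hlen : cs.length ≤ i := by
      by_contra h
      have := List.drop_eq_nil_iff.mp hdrop
      omega
    have hbuf : (cs.drop s).take (i - s) = cs.drop s := by
      apply List.take_of_length_le
      simp only [List.length_drop]; omega
    simp only [PySem.List.enumerate_nil, pvALoop, pvBLoop, hbuf,
      PySem.List.slice_from_natCast]
    rcases Nat.lt_or_ge s cs.length with hs | hs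
    · have h1 : (s : Int) < (cs.length : Int) := by exact_mod_cast hs
      have h2 : ¬ (cs.drop s).isEmpty := by
        simp only [List.isEmpty_iff, List.drop_eq_nil_iff]; omega
      simp [h1, h2]
    · have h1 : ¬ (s : Int) < (cs.length : Int) := by
        push_cast; omega
      have h2 : (cs.drop s).isEmpty := by
        simp only [List.isEmpty_iff, List.drop_eq_nil_iff]; omega
      simp [h1, h2]
  | cons c rest' ih =>
    intro i s spans hsi hdrop
    have hi : i < cs.length := by
      by_contra h
      have : cs.drop i = [] := List.drop_eq_nil_iff.mpr (by omega)
      rw [this] at hdrop; exact (List.cons_ne_nil _ _) hdrop.symm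
    have hdrop' : cs.drop (i + 1) = rest' := by
      have h : (cs.drop i).tail = rest' := by rw [hdrop]; rfl
      rwa [List.tail_drop] at h
    have hget : cs[i]? = some c := by
      have h : (cs.drop i)[0]? = some c := by rw [hdrop]; rfl
      simpa [List.getElem?_drop] using h
    rw [PySem.List.enumerate_cons]
    by_cases hmem : bc.contains (String.ofList [c])
    · -- boundary character
      have hslice : PySem.List.slice cs (some (s : Int)) (some (i : Int)) = (cs.drop s).take (i - s) :=
        PySem.List.slice_natCast ..
      simp only [pvALoop, hmem, not_true_eq_false, if_false, pvBLoop, if_true, hslice]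
      have hcast : ((i : Int) + 1) = ((i + 1 : Nat) : Int) := by omega
      rw [hcast]
      have := ih (i + 1) (i + 1) (if (s : Int) < (i : Int) then spans ++ [String.ofList ((cs.drop s).take (i - s))] else spans) (le_refl _) hdrop'
      simp only [Nat.sub_self, List.take_zero] at this
      rw [this]
      rcases Nat.lt_or_ge s i with h | h
      · have h1 : (s : Int) < (i : Int) := by exact_mod_cast h
        have h2 : ¬ ((cs.drop s).take (i - s)).isEmpty := by
          simp only [List.isEmpty_iff, ← List.length_eq_zero_iff, List.length_take,
            List.length_drop]
          omega
        simp [h1, h2]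
      · have hsi' : s = i := by omega
        subst hsi'
        simp
    · -- ordinary character
      simp only [pvALoop, hmem, not_false_eq_true, if_true, pvBLoop, if_false, Bool.false_eq_true]
      have hbuf : (cs.drop s).take (i - s) ++ [c] = (cs.drop s).take (i + 1 - s) := by
        have h1 : i + 1 - s = (i - s) + 1 := by omega
        rw [h1, List.take_add_one]
        have h2 : (cs.drop s)[i - s]? = some c := by
          rw [List.getElem?_drop]
          have : s + (i - s) = i := by omega
          rw [this, hget]
        rw [h2]; rfl
      rw [hbuf]
      exact ih (i + 1) s spans (by omega) hdrop'

-- ===== VERDICT (by name: the statement is the Claim_ definition above) =====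
theorem iter_spans_py_spec : Claim_equal_iter_spans_py := by
  intro line boundary_chars _
  unfold Spec_iter_spans_py iter_spans_py iter_spans_py_alt
  match boundary_chars with
  | none => rfl
  | some bc =>
    by_cases hbc : bc.isEmpty
    · simp [hbc]
    · simp only [hbc, if_false, Bool.false_eq_true]
      have := pv_loop_eq line.toList bc line.toList 0 0 [] (le_refl _) (by simp)
      simpa using this
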